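-- pv_equiv track=rewrite | github.com/gunasekharmalla/lcode_python | EvenSumDiff.py | countPartitions
-- ===== SOURCE A (Python) =====
-- def countPartitions(nums):
--     c = 0
--     for i in range(1, len(nums)):
--         ls1 = nums[:i]
--         ls2 = nums[i:]
--         s1 = sum(ls1)
--         s2 = sum(ls2)
--         if (s1 - s2) % 2 == 0:
--             c += 1
--     return c
-- ===== SOURCE B (Python) =====
-- def countPartitions(nums):
--     # (s1 - s2) is even iff the total sum is even, independent of the split point,
--     # so the answer is the number of split points (len-1) when the total is even, else 0.
--     return max(len(nums) - 1, 0) if sum(nums) % 2 == 0 else 0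
-- ===== Notes on version B (the rewrite author's own statement) =====
-- stated objective: faster
-- what changed: Replaced the per-split prefix/suffix summing loop by the closed form: (s1-s2) has the parity of the total sum, so the answer is max(len-1,0) if the total is even else 0.
import Mathlib
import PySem

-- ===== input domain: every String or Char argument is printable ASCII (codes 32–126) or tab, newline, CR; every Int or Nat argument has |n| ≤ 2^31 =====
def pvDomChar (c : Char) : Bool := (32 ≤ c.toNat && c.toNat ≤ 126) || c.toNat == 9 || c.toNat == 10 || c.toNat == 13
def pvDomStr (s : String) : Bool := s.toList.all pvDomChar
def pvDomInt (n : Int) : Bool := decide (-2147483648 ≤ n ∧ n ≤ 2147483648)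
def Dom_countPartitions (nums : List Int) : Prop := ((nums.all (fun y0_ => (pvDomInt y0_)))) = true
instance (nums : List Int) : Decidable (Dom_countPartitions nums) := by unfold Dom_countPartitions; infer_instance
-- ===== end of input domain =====

-- B replaces A's quadratic per-split prefix/suffix summing by the closed form
-- "max(len-1,0) if the total sum is even else 0" (same return value; objective: faster).


-- ===== PORT A =====
def countPartitions (nums : List Int) : Int :=
  (PySem.List.pyRange 1 (nums.length : Int) 1).foldl (fun c i =>
    let ls1 := PySem.List.slice nums none (some i)
    let ls2 := PySem.List.slice nums (some i) none
    let s1 := ls1.sum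
    let s2 := ls2.sum
    if PySem.Int.mod (s1 - s2) 2 = 0 then c + 1 else c) 0

-- ===== PORT B =====
def countPartitions_alt (nums : List Int) : Int :=
  if PySem.Int.mod nums.sum 2 = 0 then max ((nums.length : Int) - 1) 0 else 0

-- ===== PRECONDITION & SPEC =====
def Spec_countPartitions (nums : List Int) (out : Int) : Prop := out = countPartitions_alt nums
instance (nums : List Int) (out : Int) : Decidable (Spec_countPartitions nums out) := by unfold Spec_countPartitions; infer_instance

-- ===== CLAIM (what is proved, stated in full; the proofs are below) =====
def Claim_equal_countPartitions : Prop := ∀ (nums : List Int), Dom_countPartitions nums → Spec_countPartitions nums (countPartitions nums)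

-- ===== LEMMAS AND PROOFS =====

-- a fold that conditionally counts with a condition independent of the element
theorem foldl_count_const (q : Prop) [Decidable q] (l : List Int) (a : Int) :
    l.foldl (fun c _ => if q then c + 1 else c) a
      = a + (if q then (l.length : Int) else 0) := by
  induction l generalizing a with
  | nil => simp
  | cons x xs ih =>
      simp only [List.foldl_cons, ih, List.length_cons]
      split_ifs <;> push_cast <;> ring

-- the parity test at any split point i ∈ range(1, len) equals the parity of the total sum
theorem step_eq_total (nums : List Int) (i : Int)
    (hi : i ∈ PySem.List.pyRange 1 (nums.length : Int) 1) :
    (PySem.Int.mod ((PySem.List.slice nums none (some i)).sum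
        - (PySem.List.slice nums (some i) none).sum) 2 = 0)
      ↔ (PySem.Int.mod nums.sum 2 = 0) := by
  rw [PySem.List.mem_pyRange_one] at hi
  have h0 : (0:Int) ≤ i := by omega
  rw [PySem.List.slice_to nums h0, PySem.List.slice_from nums h0]
  have hsum : (nums.take i.toNat).sum + (nums.drop i.toNat).sum = nums.sum := by
    rw [← List.sum_append, List.take_append_drop]
  rw [PySem.Int.mod_eq_zero_iff_dvd, PySem.Int.mod_eq_zero_iff_dvd]
  omega

theorem countPartitions_eq_alt (nums : List Int) :
    countPartitions nums = countPartitions_alt nums := by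
  unfold countPartitions countPartitions_alt
  rw [PySem.List.foldl_congr_mem _ _
      (fun c (_ : Int) => if PySem.Int.mod nums.sum 2 = 0 then c + 1 else c) 0
      (by
        intro c i hi
        simp only
        rcases (step_eq_total nums i hi) with ⟨h1, h2⟩
        split_ifs with ha hb hb
        · rfl
        · exact absurd (h1 ha) hb
        · exact absurd (h2 hb) ha
        · rfl)]
  rw [foldl_count_const]
  rw [PySem.List.length_pyRange_one]
  split_ifs <;> simp
  omega

-- ===== VERDICT (by name: the statement is the Claim_ definition above) =====
theorem countPartitions_spec : Claim_equal_countPartitions := by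
  intro nums _
  exact countPartitions_eq_alt nums
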